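-- pv_equiv track=rewrite | github.com/kartash-me/Memory-Keeper | functions.py | get_days_message
-- ===== SOURCE A (Python) =====
-- def get_days_message(days):
--     if days % 10 == 1 and days % 100 != 11:
--         form = "день"
--     elif 2 <= days % 10 <= 4 and (days % 100 < 10 or days % 100 >= 20):
--         form = "дня"
--     else:
--         form = "дней"
--
--     ranges = [
--         (0, "Только что с нами!", "&#127881;"),
--         (1, "Уже целых", "&#10024;"),
--         (4, "Ого, мы", "&#128293;"),
--         (11, "Вау, уже", "&#127775;"),
--         (31, "Вот это да,", "&#127775;"),
--         (91, "Давний пользователь!", "&#9877;")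
--     ]
--     limit, message, emoji = ranges[-1]
--
--     for limit, message, emoji in ranges[::-1]:
--         if days > limit:
--             break
--
--     return f"{message} {days} {form} вместе {emoji}"
-- ===== SOURCE B (Python) =====
-- LIMITS = [0, 1, 4, 11, 31, 91]
-- MESSAGES = [
--     ("Только что с нами!", "&#127881;"),
--     ("Уже целых", "&#10024;"),
--     ("Ого, мы", "&#128293;"),
--     ("Вау, уже", "&#127775;"),
--     ("Вот это да,", "&#127775;"),
--     ("Давний пользователь!", "&#9877;"),
-- ]
--
--
-- def get_days_message(days):
--     r10, r100 = days % 10, days % 100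
--     if r10 == 1 and r100 != 11:
--         form = "день"
--     elif 2 <= r10 <= 4 and not (10 <= r100 < 20):
--         form = "дня"
--     else:
--         form = "дней"
--
--     # binary search: lo = number of limits strictly below days (bisect_left)
--     lo, hi = 0, len(LIMITS)
--     while lo < hi:
--         mid = (lo + hi) // 2
--         if LIMITS[mid] < days:
--             lo = mid + 1
--         else:
--             hi = mid
--     message, emoji = MESSAGES[max(0, lo - 1)]
--
--     return f"{message} {days} {form} вместе {emoji}"
-- ===== Notes on version B (the rewrite author's own statement) =====
-- stated objective: idiomatic
-- what changed: Replaces A's reversed linear scan with break (and its last-loop-value fallback) by a module-level sorted limits table with a hand-written bisect_left binary search and a clamped index lookup; the plural-form test is restructured around precomputed remainders.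
import Mathlib
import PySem

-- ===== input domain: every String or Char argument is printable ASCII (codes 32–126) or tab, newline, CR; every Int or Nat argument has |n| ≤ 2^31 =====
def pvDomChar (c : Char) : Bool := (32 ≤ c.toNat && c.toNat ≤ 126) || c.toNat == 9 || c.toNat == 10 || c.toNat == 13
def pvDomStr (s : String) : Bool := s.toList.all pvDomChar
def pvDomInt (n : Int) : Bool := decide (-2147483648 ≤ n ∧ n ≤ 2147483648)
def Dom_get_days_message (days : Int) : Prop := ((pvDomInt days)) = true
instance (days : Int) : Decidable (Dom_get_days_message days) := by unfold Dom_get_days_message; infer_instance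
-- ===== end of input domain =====

-- B replaces A's reverse linear scan with a break by a hand-written binary search
-- (bisect_left) over the sorted limits table; idiomatic table lookup, same buckets.


-- ===== PORT A =====
def pvRangesA : List (Int × String × String) :=
  [(0, "Только что с нами!", "&#127881;"),
   (1, "Уже целых", "&#10024;"),
   (4, "Ого, мы", "&#128293;"),
   (11, "Вау, уже", "&#127775;"),
   (31, "Вот это да,", "&#127775;"),
   (91, "Давний пользователь!", "&#9877;")]

-- the for-loop over ranges[::-1] with break: returns the first triple with days > limit,
-- otherwise the last loop value (the final element of the reversed list)
def pvScanA (days : Int) : List (Int × String × String) → (Int × String × String) → (Int × String × String)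
  | [], cur => cur
  | t :: rest, _ => if days > t.1 then t else pvScanA days rest t

def get_days_message (days : Int) : String :=
  let form :=
    if PySem.Int.mod days 10 = 1 ∧ PySem.Int.mod days 100 ≠ 11 then "день"
    else if (2 ≤ PySem.Int.mod days 10 ∧ PySem.Int.mod days 10 ≤ 4) ∧
            (PySem.Int.mod days 100 < 10 ∨ PySem.Int.mod days 100 ≥ 20) then "дня"
    else "дней"
  let init := (PySem.List.pyGet? pvRangesA (-1)).getD (0, "", "")
  let r := pvScanA days ((PySem.List.slice? pvRangesA none none (-1)).getD []) init
  r.2.1 ++ " " ++ PySem.Int.toStr days ++ " " ++ form ++ " вместе " ++ r.2.2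

-- ===== PORT B =====
def pvLimitsB : List Int := [0, 1, 4, 11, 31, 91]
def pvMsgsB : List (String × String) :=
  [("Только что с нами!", "&#127881;"),
   ("Уже целых", "&#10024;"),
   ("Ого, мы", "&#128293;"),
   ("Вау, уже", "&#127775;"),
   ("Вот это да,", "&#127775;"),
   ("Давний пользователь!", "&#9877;")]

-- Source B's while-loop binary search (bisect_left): lo = number of limits strictly below days
def pvBsearchB (days lo hi : Int) : Int :=
  if h : lo < hi then
    let mid := PySem.Int.floordiv (lo + hi) 2
    if (PySem.List.pyGet? pvLimitsB mid).getD 0 < days then pvBsearchB days (mid + 1) hi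
    else pvBsearchB days lo mid
  else lo
termination_by (hi - lo).toNat
decreasing_by
  · have h1 : lo ≤ PySem.Int.floordiv (lo + hi) 2 :=
      (PySem.Int.le_floordiv_iff_mul_le (by norm_num)).mpr (by omega)
    omega
  · have h2 : PySem.Int.floordiv (lo + hi) 2 < hi :=
      (PySem.Int.floordiv_lt_iff_lt_mul (by norm_num)).mpr (by omega)
    omega

def get_days_message_alt (days : Int) : String :=
  let r10 := PySem.Int.mod days 10
  let r100 := PySem.Int.mod days 100
  let form :=
    if r10 = 1 ∧ r100 ≠ 11 then "день"
    else if (2 ≤ r10 ∧ r10 ≤ 4) ∧ ¬(10 ≤ r100 ∧ r100 < 20) then "дня"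
    else "дней"
  let lo := pvBsearchB days 0 6
  let p := (PySem.List.pyGet? pvMsgsB (max 0 (lo - 1))).getD ("", "")
  p.1 ++ " " ++ PySem.Int.toStr days ++ " " ++ form ++ " вместе " ++ p.2

-- ===== PRECONDITION & SPEC =====
def Spec_get_days_message (days : Int) (out : String) : Prop := out = get_days_message_alt days
instance (days : Int) (out : String) : Decidable (Spec_get_days_message days out) := by unfold Spec_get_days_message; infer_instance

-- ===== CLAIM (what is proved, stated in full; the proofs are below) =====
def Claim_equal_get_days_message : Prop := ∀ (days : Int), Dom_get_days_message days → Spec_get_days_message days (get_days_message days)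

-- ===== LEMMAS AND PROOFS =====

theorem pv_bs_leaf (days lo : Int) : pvBsearchB days lo lo = lo := by
  rw [pvBsearchB.eq_def]; norm_num

set_option maxHeartbeats 1000000 in
theorem pv_bs (days : Int) : pvBsearchB days 0 6 =
    if 11 < days then (if 91 < days then 6 else if 31 < days then 5 else 4)
    else if 1 < days then (if 4 < days then 3 else 2)
    else if 0 < days then 1 else 0 := by
  have e45 : pvBsearchB days 4 5 = if 31 < days then 5 else 4 := by
    rw [pvBsearchB.eq_def, dif_pos (show (4:Int)<5 by norm_num)]
    simp only [show PySem.Int.floordiv (4+5 : Int) 2 = 4 from by decide,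
      show (PySem.List.pyGet? pvLimitsB 4).getD 0 = (31:Int) from by decide, pv_bs_leaf]
    norm_num [pv_bs_leaf]
  have e46 : pvBsearchB days 4 6 = if 91 < days then 6 else if 31 < days then 5 else 4 := by
    rw [pvBsearchB.eq_def, dif_pos (show (4:Int)<6 by norm_num)]
    simp only [show PySem.Int.floordiv (4+6 : Int) 2 = 5 from by decide,
      show (PySem.List.pyGet? pvLimitsB 5).getD 0 = (91:Int) from by decide, e45]
    norm_num [pv_bs_leaf]
  have e23 : pvBsearchB days 2 3 = if 4 < days then 3 else 2 := by
    rw [pvBsearchB.eq_def, dif_pos (show (2:Int)<3 by norm_num)]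
    simp only [show PySem.Int.floordiv (2+3 : Int) 2 = 2 from by decide,
      show (PySem.List.pyGet? pvLimitsB 2).getD 0 = (4:Int) from by decide, pv_bs_leaf]
    norm_num [pv_bs_leaf]
  have e01 : pvBsearchB days 0 1 = if 0 < days then 1 else 0 := by
    rw [pvBsearchB.eq_def, dif_pos (show (0:Int)<1 by norm_num)]
    simp only [show PySem.Int.floordiv (0+1 : Int) 2 = 0 from by decide,
      show (PySem.List.pyGet? pvLimitsB 0).getD 0 = (0:Int) from by decide, pv_bs_leaf]
    norm_num [pv_bs_leaf]
  have e03 : pvBsearchB days 0 3 = if 1 < days then (if 4 < days then 3 else 2)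
      else if 0 < days then 1 else 0 := by
    rw [pvBsearchB.eq_def, dif_pos (show (0:Int)<3 by norm_num)]
    simp only [show PySem.Int.floordiv (0+3 : Int) 2 = 1 from by decide,
      show (PySem.List.pyGet? pvLimitsB 1).getD 0 = (1:Int) from by decide, e01]
    norm_num [e23]
  rw [pvBsearchB.eq_def, dif_pos (show (0:Int)<6 by norm_num)]
  simp only [show PySem.Int.floordiv (0+6 : Int) 2 = 3 from by decide,
    show (PySem.List.pyGet? pvLimitsB 3).getD 0 = (11:Int) from by decide, e03]
  norm_num [e46]

set_option maxRecDepth 4096 in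
set_option maxHeartbeats 1000000 in
theorem pv_main (days : Int) : get_days_message days = get_days_message_alt days := by
  have h10 : PySem.Int.mod days 10 = days % 10 := PySem.Int.mod_eq_emod_of_pos (by norm_num)
  have h100 : PySem.Int.mod days 100 = days % 100 := PySem.Int.mod_eq_emod_of_pos (by norm_num)
  simp only [get_days_message, get_days_message_alt, h10, h100,
    PySem.List.slice?_none_none_neg_one, pvRangesA, pvMsgsB,
    List.reverse_cons, List.reverse_nil, List.nil_append, List.cons_append,
    Option.getD_some, pvScanA]
  rw [pv_bs]
  split_ifs <;> first | omega | rfl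

-- ===== VERDICT (by name: the statement is the Claim_ definition above) =====
theorem get_days_message_spec : Claim_equal_get_days_message := by
  intro days _
  exact pv_main days
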